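-- pv_equiv track=rewrite | github.com/PlamenHristov/HackerRank | challenges/blackrock/trade_analysis.py | g_func
-- ===== SOURCE A (Python) =====
-- import itertools
--
-- def g_func(input_set):
--     res = 0
--     for size, num in enumerate(input_set):
--         for comb in itertools.combinations(input_set, size + 1):
--             prod = 1
--             for val in comb:
--                 prod *= val
--             res += num * prod
--     res %= (10 ** 9 + 7)
--     return res
-- ===== SOURCE B (Python) =====
-- def g_func(input_set):
--     # DP: e = coefficients of prod(1 + a*x), i.e. e[k] = k-th elementary symmetric polynomial
--     e = [1]
--     for a in input_set:
--         e = [1] + [e[j] + a * e[j - 1] for j in range(1, len(e))] + [a * e[-1]]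
--     res = sum(num * e[i + 1] for i, num in enumerate(input_set))
--     return res % (10 ** 9 + 7)
-- ===== Notes on version B (the rewrite author's own statement) =====
-- stated objective: faster
-- what changed: Replaces A's enumeration of every combination of every size (summing each product) by an O(n^2) dynamic program that builds the elementary symmetric polynomial coefficients of prod(1+a*x) in one pass, then takes the weighted sum input[i]*e[i+1] mod 1e9+7.
import Mathlib
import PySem

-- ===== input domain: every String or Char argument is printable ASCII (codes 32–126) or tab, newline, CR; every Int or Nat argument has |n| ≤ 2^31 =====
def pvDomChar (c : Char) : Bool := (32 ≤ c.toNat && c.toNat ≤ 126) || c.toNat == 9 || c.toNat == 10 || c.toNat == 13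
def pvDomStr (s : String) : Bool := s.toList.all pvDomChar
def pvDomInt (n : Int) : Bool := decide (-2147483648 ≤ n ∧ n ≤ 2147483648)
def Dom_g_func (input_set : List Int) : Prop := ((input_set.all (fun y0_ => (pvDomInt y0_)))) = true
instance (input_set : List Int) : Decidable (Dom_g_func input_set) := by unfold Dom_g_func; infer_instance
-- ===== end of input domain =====

-- B replaces A's enumeration of all combinations (O(2^n·n)) by an O(n^2) DP for the
-- elementary symmetric polynomials followed by a weighted sum (objective: faster, asymptotic).

-- ===== PORT A =====
def g_func (input_set : List Int) : Int :=
  let res : Int :=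
    (PySem.List.enumerate input_set).foldl (fun res sn =>
      (PySem.List.combinations input_set (sn.1 + 1).toNat).foldl (fun res comb =>
        res + sn.2 * (comb.foldl (fun prod val => prod * val) 1)) res) 0
  PySem.Int.mod res (10 ^ 9 + 7)

-- ===== PORT B =====
-- one DP step: e := [1] + [e[j] + a*e[j-1] for j in range(1,len(e))] + [a*e[-1]]
def stepE (e : List Int) (a : Int) : List Int :=
  1 :: ((PySem.List.pyRange 1 (e.length : Int) 1).map
          (fun j => PySem.List.pyGetD e j 0 + a * PySem.List.pyGetD e (j - 1) 0)
        ++ [a * PySem.List.pyGetD e (-1) 0])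

def g_func_alt (input_set : List Int) : Int :=
  let e := input_set.foldl stepE [1]
  let res : Int :=
    (PySem.List.enumerate input_set).foldl
      (fun acc p => acc + p.2 * PySem.List.pyGetD e (p.1 + 1) 0) 0
  PySem.Int.mod res (10 ^ 9 + 7)

-- ===== PRECONDITION & SPEC =====
def Spec_g_func (input_set : List Int) (out : Int) : Prop := out = g_func_alt input_set
instance (input_set : List Int) (out : Int) : Decidable (Spec_g_func input_set out) := by unfold Spec_g_func; infer_instance

-- ===== CLAIM (what is proved, stated in full; the proofs are below) =====
def Claim_equal_g_func : Prop := ∀ (input_set : List Int), Dom_g_func input_set → Spec_g_func input_set (g_func input_set)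

-- ===== LEMMAS AND PROOFS =====

-- sum over all size-k combinations of the product (A's inner two loops for one k)
def esum (k : Nat) (xs : List Int) : Int :=
  ((PySem.List.combinations xs k).map (fun c => c.foldl (fun prod val => prod * val) 1)).sum

theorem esum_eq_prod (k : Nat) (xs : List Int) :
    esum k xs = ((PySem.List.combinations xs k).map List.prod).sum := by
  unfold esum
  congr 1
  refine List.map_congr_left ?_
  intro c _
  rw [List.prod_eq_foldl]

theorem esum_zero (xs : List Int) : esum 0 xs = 1 := by
  simp [esum, PySem.List.combinations_zero]

theorem esum_nil (r : Nat) : esum (r + 1) [] = 0 := by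
  simp [esum, PySem.List.combinations_nil_succ]

theorem esum_cons (y : Int) (xs : List Int) (r : Nat) :
    esum (r + 1) (y :: xs) = y * esum r xs + esum (r + 1) xs := by
  simp only [esum_eq_prod, PySem.List.combinations_cons_succ, List.map_append, List.map_map,
    List.sum_append]
  congr 1
  rw [← List.sum_map_mul_left]
  refine congrArg List.sum (List.map_congr_left ?_)
  intro c _
  simp [List.prod_cons]

theorem esum_overflow (r : Nat) (xs : List Int) (h : xs.length < r) : esum r xs = 0 := by
  simp [esum, PySem.List.combinations_eq_nil_of_length_lt xs h]

theorem esum_append (xs : List Int) (x : Int) :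
    ∀ r : Nat, esum (r + 1) (xs ++ [x]) = esum (r + 1) xs + x * esum r xs := by
  induction xs with
  | nil =>
    intro r
    cases r with
    | zero => simp [esum_cons, esum_zero, esum_nil]
    | succ s => simp [esum_cons, esum_nil]
  | cons y ys ih =>
    intro r
    cases r with
    | zero =>
      simp only [List.cons_append, esum_cons, esum_zero, ih 0]
      ring
    | succ s =>
      simp only [List.cons_append, esum_cons, ih s, ih (s + 1)]
      ring

theorem stepE_map (ys : List Int) (x : Int) :
    stepE ((List.range (ys.length + 1)).map (fun k => esum k ys)) x
      = (List.range (ys.length + 2)).map (fun k => esum k (ys ++ [x])) := by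
  have hlen : (((List.range (ys.length + 1)).map (fun k => esum k ys)).length : Int)
      = ((ys.length + 1 : Nat) : Int) := by simp
  have hr : PySem.List.pyRange 1 ((ys.length + 1 : Nat) : Int) 1
      = (List.range ys.length).map (fun k : Nat => (1 : Int) + k) := by
    rw [PySem.List.pyRange_one]
    have h1 : ((ys.length + 1 : Nat) : Int) - 1 = (ys.length : Int) := by push_cast; ring
    rw [h1, Int.toNat_natCast]
  rw [stepE, hlen, hr, List.map_map]
  rw [show ys.length + 2 = (ys.length + 1) + 1 from rfl]
  conv_rhs => rw [List.range_succ_eq_map, List.map_cons, List.map_map, List.range_succ,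
    List.map_append]
  rw [esum_zero]
  congr 1
  congr 1
  · refine List.map_congr_left ?_
    intro k hk
    have hkn : k < ys.length := List.mem_range.mp hk
    simp only [Function.comp]
    rw [show (1 : Int) + (k : Int) = ((k + 1 : Nat) : Int) by push_cast; ring]
    rw [show ((k + 1 : Nat) : Int) - 1 = ((k : Nat) : Int) by push_cast; ring]
    rw [PySem.List.pyGetD_natCast, PySem.List.pyGetD_natCast,
        PySem.List.getD_map_range _ _ _ _ (by omega),
        PySem.List.getD_map_range _ _ _ _ (by omega)]
    rw [esum_append ys x k]
  · have hL : (List.range (ys.length + 1)).map (fun k => esum k ys)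
        = (List.range ys.length).map (fun k => esum k ys) ++ [esum ys.length ys] := by
      rw [List.range_succ, List.map_append]; rfl
    rw [hL, PySem.List.pyGetD_neg_one_append_singleton]
    simp only [List.map_cons, List.map_nil, Function.comp]
    rw [esum_append ys x ys.length, esum_overflow (ys.length + 1) ys (by omega)]
    simp

theorem foldl_stepE (xs : List Int) :
    xs.foldl stepE [1] = (List.range (xs.length + 1)).map (fun k => esum k xs) := by
  induction xs using List.reverseRecOn with
  | nil => simp [esum_zero]
  | append_singleton ys x ih =>
    rw [List.foldl_append, ih]
    simp only [List.foldl_cons, List.foldl_nil]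
    rw [stepE_map ys x]
    simp

theorem enumerate_fst_bounds {α : Type} (xs : List α) :
    ∀ (s : Int) (p : Int × α), p ∈ PySem.List.enumerate xs s →
      s ≤ p.1 ∧ p.1 < s + xs.length := by
  induction xs with
  | nil => intro s p hp; simp [PySem.List.enumerate_nil] at hp
  | cons y ys ih =>
    intro s p hp
    rw [PySem.List.enumerate_cons] at hp
    rcases List.mem_cons.mp hp with h | h
    · subst h
      simp
    · have := ih (s + 1) p h
      simp only [List.length_cons]
      push_cast
      omega

theorem g_func_res_eq (xs : List Int) :
    (PySem.List.enumerate xs).foldl (fun res sn =>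
      (PySem.List.combinations xs (sn.1 + 1).toNat).foldl (fun res comb =>
        res + sn.2 * (comb.foldl (fun prod val => prod * val) 1)) res) 0
    = (PySem.List.enumerate xs).foldl
        (fun acc p => acc + p.2 * PySem.List.pyGetD (xs.foldl stepE [1]) (p.1 + 1) 0) 0 := by
  rw [foldl_stepE]
  apply PySem.List.foldl_congr_mem
  intro acc p hp
  have hb := enumerate_fst_bounds xs 0 p hp
  rw [PySem.List.foldl_add]
  rw [show p.1 + 1 = ((p.1.toNat + 1 : Nat) : Int) by omega]
  rw [PySem.List.pyGetD_natCast,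
      PySem.List.getD_map_range _ _ _ _ (by omega)]
  rw [show (((p.1.toNat + 1 : Nat) : Int)).toNat = p.1.toNat + 1 by omega]
  rw [List.sum_map_mul_left]
  rfl

-- ===== VERDICT (by name: the statement is the Claim_ definition above) =====
theorem g_func_spec : Claim_equal_g_func := by
  intro xs _
  unfold Spec_g_func g_func g_func_alt
  simp only [g_func_res_eq xs]
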